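-- pv_equiv track=rewrite | github.com/qazwsxedc121/lex_mint | src/infrastructure/config/code_execution_config_service.py | _normalize_execution_priority
-- ===== SOURCE A (Python) =====
-- _ALLOWED_EXECUTION_METHODS = ("client", "server_jupyter", "server_subprocess")
--
-- def _normalize_execution_priority(value: object) -> list[str]:
--     if not isinstance(value, list):
--         value = []
--     seen: set[str] = set()
--     ordered: list[str] = []
--     for item in value:
--         method = str(item or "").strip()
--         if method in _ALLOWED_EXECUTION_METHODS and method not in seen:
--             ordered.append(method)
--             seen.add(method)
--     for method in _ALLOWED_EXECUTION_METHODS: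
--         if method not in seen:
--             ordered.append(method)
--     return ordered
-- ===== SOURCE B (Python) =====
-- _ALLOWED_EXECUTION_METHODS = ("client", "server_jupyter", "server_subprocess")
--
-- def _normalize_execution_priority(value: object) -> list[str]:
--     if not isinstance(value, list):
--         value = []
--     first_index: dict[str, int] = {}
--     for i, item in enumerate(value):
--         method = str(item or "").strip()
--         if method in _ALLOWED_EXECUTION_METHODS:
--             first_index.setdefault(method, i)
--     n = len(value)
--     return sorted(
--         _ALLOWED_EXECUTION_METHODS,
--         key=lambda m: first_index.get(m, n + _ALLOWED_EXECUTION_METHODS.index(m)),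
--     )
-- ===== Notes on version B (the rewrite author's own statement) =====
-- stated objective: alternative
-- what changed: Replaces A's seen-set with two append loops by a single pass recording each valid method's first-occurrence index in a dict, then one stable sort of the canonical allowed tuple by that index (absent methods ranked after all present ones in canonical order).
import Mathlib
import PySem

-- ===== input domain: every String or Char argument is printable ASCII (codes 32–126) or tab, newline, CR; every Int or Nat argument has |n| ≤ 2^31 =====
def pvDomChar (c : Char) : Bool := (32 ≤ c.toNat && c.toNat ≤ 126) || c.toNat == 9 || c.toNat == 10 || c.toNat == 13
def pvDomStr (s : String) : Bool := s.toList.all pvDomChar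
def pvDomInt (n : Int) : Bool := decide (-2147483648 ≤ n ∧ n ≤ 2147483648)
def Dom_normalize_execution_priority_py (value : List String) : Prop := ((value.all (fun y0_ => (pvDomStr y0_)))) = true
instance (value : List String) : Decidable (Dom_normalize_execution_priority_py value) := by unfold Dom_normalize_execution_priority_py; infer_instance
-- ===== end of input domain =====

-- B replaces A's seen-set plus two append loops by a single first-occurrence-index table followed by
-- one sort of the canonical tuple (objective: alternative decomposition, same asymptotic cost).

-- _ALLOWED_EXECUTION_METHODS
def pvAllowed : List String := ["client", "server_jupyter", "server_subprocess"]

-- ===== PORT A =====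
-- 'isinstance(value, list)' always holds for a List String argument, so the '[]' branch is dead;
-- 'str(item or "")' = item for a string item (an empty string is falsy and maps to "" = itself).
def normalize_execution_priority_py (value : List String) : List String :=
  let st := value.foldl
    (fun (st : PySem.Set String × List String) item =>
      let method := PySem.Str.strip item
      if method ∈ pvAllowed ∧ method ∉ st.1
      then (PySem.Set.add st.1 method, st.2 ++ [method])
      else st)
    (PySem.Set.empty, [])
  pvAllowed.foldl (fun ordered m => if m ∉ st.1 then ordered ++ [m] else ordered) st.2

-- ===== PORT B =====
-- '_ALLOWED_EXECUTION_METHODS.index(m)': m ranges over pvAllowed itself, so index? is always some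
-- and the .getD 0 default is never used.
def normalize_execution_priority_py_alt (value : List String) : List String :=
  let fi := (PySem.List.enumerate value).foldl
    (fun (d : PySem.Dict String Int) p =>
      let method := PySem.Str.strip p.2
      if method ∈ pvAllowed then d.setdefault method p.1 else d)
    PySem.Dict.empty
  PySem.List.sorted pvAllowed
    (fun m => fi.getD m ((value.length : Int) + (((PySem.List.index? pvAllowed m).getD 0 : Nat) : Int)))
    false

-- ===== PRECONDITION & SPEC =====
def Spec_normalize_execution_priority_py (value : List String) (out : List String) : Prop := out = normalize_execution_priority_py_alt value
instance (value : List String) (out : List String) : Decidable (Spec_normalize_execution_priority_py value out) := by unfold Spec_normalize_execution_priority_py; infer_instance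

-- ===== CLAIM (what is proved, stated in full; the proofs are below) =====
def Claim_equal_normalize_execution_priority_py : Prop := ∀ (value : List String), Dom_normalize_execution_priority_py value → Spec_normalize_execution_priority_py value (normalize_execution_priority_py value)

-- ===== LEMMAS AND PROOFS =====

-- A's first loop with the Set component dropped: seen and ordered always hold the same list.
def pvStep1 (acc : List String) (x : String) : List String :=
  if PySem.Str.strip x ∈ pvAllowed ∧ PySem.Str.strip x ∉ acc then acc ++ [PySem.Str.strip x] else acc

lemma pv_collapse (value : List String) (s : List String) :
    value.foldl
      (fun (st : PySem.Set String × List String) item =>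
        let method := PySem.Str.strip item
        if method ∈ pvAllowed ∧ method ∉ st.1
        then (PySem.Set.add st.1 method, st.2 ++ [method])
        else st)
      (s, s)
    = (value.foldl pvStep1 s, value.foldl pvStep1 s) := by
  induction value generalizing s with
  | nil => rfl
  | cons x xs ih =>
    simp only [List.foldl_cons]
    by_cases h : PySem.Str.strip x ∈ pvAllowed ∧ PySem.Str.strip x ∉ s
    · simp only [pvStep1, if_pos h, PySem.Set.add_of_not_mem h.2]
      exact ih (s ++ [PySem.Str.strip x])
    · simp only [pvStep1, if_neg h]
      exact ih s

-- B's loop body.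
def pvStepB (d : PySem.Dict String Int) (p : Int × String) : PySem.Dict String Int :=
  if PySem.Str.strip p.2 ∈ pvAllowed then d.setdefault (PySem.Str.strip p.2) p.1 else d

-- key used by B's sort
def pvRank (m : String) : Int := (((PySem.List.index? pvAllowed m).getD 0 : Nat) : Int)

lemma pv_getD (d : PySem.Dict String Int) (m : String) (dflt : Int) :
    d.getD m dflt = (d.get? m).getD dflt := rfl

lemma pv_rank_nonneg (m : String) : 0 ≤ pvRank m := by
  unfold pvRank; positivity

lemma pv_rank_pairwise : pvAllowed.Pairwise (fun a b => pvRank a < pvRank b) := by decide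

lemma pv_allowed_nodup : pvAllowed.Nodup := by decide

-- joint loop invariant
def pvInv (ordered : List String) (d : PySem.Dict String Int) (i0 : Int) : Prop :=
  ordered.Nodup ∧
  (∀ m ∈ ordered, m ∈ pvAllowed) ∧
  (∀ m : String, d.contains m = true ↔ m ∈ ordered) ∧
  ordered.Pairwise (fun a b => (d.get? a).getD 0 < (d.get? b).getD 0) ∧
  (∀ m ∈ ordered, (d.get? m).getD 0 < i0)

lemma pv_joint (value : List String) (ordered : List String) (d : PySem.Dict String Int)
    (i0 N : Int) (hinv : pvInv ordered d i0) (hN : i0 + (value.length : Int) = N) :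
    (value.foldl pvStep1 ordered)
      ++ pvAllowed.filter (fun m => decide (m ∉ value.foldl pvStep1 ordered))
    = PySem.List.sorted pvAllowed
        (fun m => ((PySem.List.enumerate value i0).foldl pvStepB d).getD m (N + pvRank m)) false := by
  induction value generalizing ordered d i0 with
  | nil =>
    obtain ⟨hnd, hsub, hcont, hpw, hlt⟩ := hinv
    simp only [List.length_nil, Nat.cast_zero, add_zero] at hN
    subst hN
    simp only [PySem.List.enumerate_nil, List.foldl_nil]
    refine (PySem.List.sorted_eq_of_perm_of_pairwise_lt _ _ _ ?_ ?_).symm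
    · -- permutation
      rw [List.perm_ext_iff_of_nodup ?_ pv_allowed_nodup]
      · intro a
        constructor
        · intro ha
          rcases List.mem_append.1 ha with h | h
          · exact hsub a h
          · exact (List.mem_filter.1 h).1
        · intro ha
          by_cases h : a ∈ ordered
          · exact List.mem_append.2 (Or.inl h)
          · exact List.mem_append.2 (Or.inr (List.mem_filter.2 ⟨ha, by simpa using h⟩))
      · refine hnd.append (pv_allowed_nodup.filter _) ?_
        intro a ha hb
        have := (List.mem_filter.1 hb).2
        simp only [decide_eq_true_eq] at this
        exact this ha
    · -- pairwise strictly increasing keys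
      rw [List.pairwise_append]
      refine ⟨?_, ?_, ?_⟩
      · refine hpw.imp_of_mem ?_
        intro a b ha hb hab
        have hsa := (PySem.Dict.contains_eq_isSome_get? d a) ▸ (hcont a).2 ha
        have hsb := (PySem.Dict.contains_eq_isSome_get? d b) ▸ (hcont b).2 hb
        obtain ⟨va, hva⟩ := Option.isSome_iff_exists.1 hsa
        obtain ⟨vb, hvb⟩ := Option.isSome_iff_exists.1 hsb
        simp only [pv_getD, hva, hvb, Option.getD_some] at hab ⊢
        exact hab
      · refine (pv_rank_pairwise.filter _).imp_of_mem ?_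
        intro a b ha hb hab
        have hna : a ∉ ordered := by
          have := (List.mem_filter.1 ha).2; simpa using this
        have hnb : b ∉ ordered := by
          have := (List.mem_filter.1 hb).2; simpa using this
        have hga : d.get? a = none := by
          have h := fun h => hna ((hcont a).1 h)
          rw [PySem.Dict.contains_eq_isSome_get?] at h
          exact Option.not_isSome_iff_eq_none.1 h
        have hgb : d.get? b = none := by
          have h := fun h => hnb ((hcont b).1 h)
          rw [PySem.Dict.contains_eq_isSome_get?] at h
          exact Option.not_isSome_iff_eq_none.1 h
        simp only [pv_getD, hga, hgb, Option.getD_none]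
        omega
      · intro a ha b hb
        have hsa := (PySem.Dict.contains_eq_isSome_get? d a) ▸ (hcont a).2 ha
        obtain ⟨va, hva⟩ := Option.isSome_iff_exists.1 hsa
        have hlta : va < i0 := by have := hlt a ha; simpa [hva] using this
        have hnb : b ∉ ordered := by
          have := (List.mem_filter.1 hb).2; simpa using this
        have hgb : d.get? b = none := by
          have h := fun h => hnb ((hcont b).1 h)
          rw [PySem.Dict.contains_eq_isSome_get?] at h
          exact Option.not_isSome_iff_eq_none.1 h
        have := pv_rank_nonneg b
        simp only [pv_getD, hva, hgb, Option.getD_some, Option.getD_none]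
        omega
  | cons x xs ih =>
    simp only [PySem.List.enumerate_cons, List.foldl_cons]
    by_cases hmem : PySem.Str.strip x ∈ pvAllowed
    · by_cases hord : PySem.Str.strip x ∈ ordered
      · -- already recorded: both loops leave their state unchanged
        have hA : pvStep1 ordered x = ordered := by
          simp [pvStep1, hord]
        have hB : pvStepB d (i0, x) = d := by
          simp only [pvStepB]
          rw [if_pos hmem, PySem.Dict.setdefault_of_contains d _ ((hinv.2.2.1 _).2 hord)]
        simp only [hA, hB]
        refine ih ordered d (i0 + 1) ?_ (by simp only [List.length_cons] at hN; push_cast at hN ⊢; omega)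
        obtain ⟨hnd, hsub, hcont, hpw, hlt⟩ := hinv
        exact ⟨hnd, hsub, hcont, hpw, fun m hm => by have := hlt m hm; omega⟩
      · -- new method: A appends, B inserts index i0
        have hA : pvStep1 ordered x = ordered ++ [PySem.Str.strip x] := by
          simp [pvStep1, hmem, hord]
        have hcf : d.contains (PySem.Str.strip x) = false := by
          have h := fun h => hord ((hinv.2.2.1 (PySem.Str.strip x)).1 h)
          simpa using h
        have hB : pvStepB d (i0, x) = d.insert (PySem.Str.strip x) i0 := by
          simp only [pvStepB]
          rw [if_pos hmem, PySem.Dict.setdefault_of_not_contains d _ hcf]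
        simp only [hA, hB]
        obtain ⟨hnd, hsub, hcont, hpw, hlt⟩ := hinv
        refine ih (ordered ++ [PySem.Str.strip x]) _ (i0 + 1) ?_ (by simp only [List.length_cons] at hN; push_cast at hN ⊢; omega)
        have hval : ∀ m ∈ ordered, (d.insert (PySem.Str.strip x) i0).get? m = d.get? m := by
          intro m hm
          exact PySem.Dict.get?_insert_of_ne d i0 (fun h => hord (h ▸ hm))
        refine ⟨?_, ?_, ?_, ?_, ?_⟩
        · refine hnd.append (by simp) ?_
          intro a ha hb
          rw [List.mem_singleton] at hb
          exact hord (hb ▸ ha)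
        · intro m hm
          rcases List.mem_append.1 hm with h | h
          · exact hsub m h
          · simpa using (List.mem_singleton.1 h) ▸ hmem
        · intro m
          by_cases h : m = PySem.Str.strip x
          · subst h
            simp [PySem.Dict.contains_eq_isSome_get?, PySem.Dict.get?_insert_self]
          · rw [PySem.Dict.contains_eq_isSome_get?,
              PySem.Dict.get?_insert_of_ne d i0 h, ← PySem.Dict.contains_eq_isSome_get?]
            simp [hcont m, h]
        · rw [List.pairwise_append]
          refine ⟨?_, by simp, ?_⟩
          · refine hpw.imp_of_mem ?_
            intro a b ha hb hab
            rw [hval a ha, hval b hb]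
            exact hab
          · intro a ha b hb
            rw [List.mem_singleton.1 hb, hval a ha, PySem.Dict.get?_insert_self]
            have := hlt a ha
            simpa using this
        · intro m hm
          rcases List.mem_append.1 hm with h | h
          · rw [hval m h]; have := hlt m h; omega
          · rw [List.mem_singleton.1 h, PySem.Dict.get?_insert_self]
            simp
    · -- not an allowed method: both loops skip it
      have hA : pvStep1 ordered x = ordered := by simp [pvStep1, hmem]
      have hB : pvStepB d (i0, x) = d := by simp [pvStepB, hmem]
      simp only [hA, hB]
      refine ih ordered d (i0 + 1) ?_ (by simp only [List.length_cons] at hN; push_cast at hN ⊢; omega)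
      obtain ⟨hnd, hsub, hcont, hpw, hlt⟩ := hinv
      exact ⟨hnd, hsub, hcont, hpw, fun m hm => by have := hlt m hm; omega⟩

lemma pv_inv_init : pvInv [] PySem.Dict.empty 0 := by
  refine ⟨List.nodup_nil, by simp, ?_, List.Pairwise.nil, by simp⟩
  intro m
  simp [PySem.Dict.contains, PySem.Dict.empty]

-- ===== VERDICT (by name: the statement is the Claim_ definition above) =====
theorem normalize_execution_priority_py_spec : Claim_equal_normalize_execution_priority_py := by
  intro value _
  unfold Spec_normalize_execution_priority_py
  unfold normalize_execution_priority_py normalize_execution_priority_py_alt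
  have h0 : (PySem.Set.empty, ([] : List String)) = (([] : List String), ([] : List String)) := rfl
  rw [h0, pv_collapse value []]
  simp only []
  rw [PySem.List.foldl_append_ite_eq_filter
    (p := fun m => m ∉ value.foldl pvStep1 []) (l := pvAllowed)]
  exact pv_joint value [] PySem.Dict.empty 0 (value.length : Int) pv_inv_init (by omega)
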